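-- pv_equiv track=rewrite | github.com/syfang135/MAYI-2023204068-SuYufang | strategies.py | allocate_machines_first_fit
-- ===== SOURCE A (Python) =====
-- from typing import List, Optional, Dict, Tuple, Any
--
-- def allocate_machines_first_fit(job: Dict[str, Any],
--                                 machine_statuses: List[str]) -> Optional[List[int]]:
--     """
--     First Fit 机器分配算法：查找第一个足够大的连续空闲块。
--
--     参数:
--         job: 作业属性字典，必须包含 resource_num
--         machine_statuses: 机器状态列表
--
--     返回:
--         分配的机器ID列表（连续块），或 None（分配失败）
--     """
--     required = job["resource_num"]
--     total_machines = len(machine_statuses)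
--
--     consecutive_idle = 0
--     start_idx = -1
--
--     for i in range(total_machines):
--         if machine_statuses[i] == "idle":
--             if consecutive_idle == 0:
--                 start_idx = i  # 记录连续空闲块的起始位置
--             consecutive_idle += 1
--
--             if consecutive_idle == required:
--                 # 找到足够大的连续空闲块
--                 return list(range(start_idx, start_idx + required))
--         else:
--             # 遇到非空闲机器，重置计数器
--             consecutive_idle = 0
--
--     # 没有找到足够大的连续空闲块
--     return None
-- ===== SOURCE B (Python) =====
-- from typing import List, Optional, Dict, Tuple, Any
--
-- def allocate_machines_first_fit(job: Dict[str, Any],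
--                                 machine_statuses: List[str]) -> Optional[List[int]]:
--     """Run-length decomposition: split statuses into maximal runs of equal
--     values, then scan the runs for the first 'idle' run long enough."""
--     required = job["resource_num"]
--     if required <= 0:
--         return None
--     runs = []
--     i = 0
--     n = len(machine_statuses)
--     while i < n:
--         j = i
--         while j < n and machine_statuses[j] == machine_statuses[i]:
--             j += 1
--         runs.append((machine_statuses[i], j - i))
--         i = j
--     start = 0
--     for key, length in runs:
--         if key == "idle" and required <= length:
--             return list(range(start, start + required))
--         start += length
--     return None
-- ===== Notes on version B (the rewrite author's own statement) =====
-- stated objective: alternative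
-- what changed: Replaces A's per-machine counter-with-reset scan by a run-length decomposition: the status list is split into maximal runs of equal values, then the runs are scanned for the first 'idle' run of sufficient length (with an explicit required<=0 guard matching A's None there).
import Mathlib
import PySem

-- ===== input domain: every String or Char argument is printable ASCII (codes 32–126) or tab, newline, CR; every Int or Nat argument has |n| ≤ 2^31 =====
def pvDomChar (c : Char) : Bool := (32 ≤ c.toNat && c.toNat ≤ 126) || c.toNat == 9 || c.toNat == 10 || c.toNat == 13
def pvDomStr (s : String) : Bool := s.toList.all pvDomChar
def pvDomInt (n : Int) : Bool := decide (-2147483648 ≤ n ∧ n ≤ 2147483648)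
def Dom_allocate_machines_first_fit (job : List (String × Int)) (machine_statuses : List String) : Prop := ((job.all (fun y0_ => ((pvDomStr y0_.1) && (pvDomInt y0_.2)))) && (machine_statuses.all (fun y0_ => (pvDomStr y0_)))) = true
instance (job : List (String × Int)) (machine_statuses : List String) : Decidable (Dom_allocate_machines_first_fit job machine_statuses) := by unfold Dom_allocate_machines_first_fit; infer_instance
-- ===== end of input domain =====

-- B replaces A's counter-with-reset scan by a run-length decomposition of the status list (objective: alternative).

-- ===== PORT A =====
-- A's for-loop over indices: structural recursion over the statuses carrying the
-- current index i, the consecutive-idle counter and the recorded start index.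
def pvLoopA (required : Int) : List String → Int → Int → Int → Option (List Int)
  | [], _, _, _ => none
  | s :: rest, i, consecutive_idle, start_idx =>
    if s = "idle" then
      let start_idx' := if consecutive_idle = 0 then i else start_idx
      let consecutive_idle' := consecutive_idle + 1
      if consecutive_idle' = required then
        some (PySem.List.pyRange start_idx' (start_idx' + required) 1)
      else pvLoopA required rest (i + 1) consecutive_idle' start_idx'
    else pvLoopA required rest (i + 1) 0 start_idx

def allocate_machines_first_fit (job : List (String × Int)) (machine_statuses : List String) : Option (List Int) :=
  match (PySem.Dict.mk job).get? "resource_num" with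
  | none => none  -- Python raises KeyError here; excluded by Pre_
  | some required => pvLoopA required machine_statuses 0 0 (-1)

-- ===== PORT B =====
-- maximal runs of equal adjacent statuses, as (value, run length) pairs
def pvRuns : List String → List (String × Nat)
  | [] => []
  | s :: rest =>
    (s, 1 + (rest.takeWhile (· = s)).length) :: pvRuns (rest.dropWhile (· = s))
  termination_by l => l.length
  decreasing_by simp only [List.length_cons]; exact Nat.lt_succ_of_le (List.length_dropWhile_le _ _)

def pvScanB (required : Int) : List (String × Nat) → Int → Option (List Int)
  | [], _ => none
  | (key, len) :: rest, start =>
    if key = "idle" ∧ required ≤ (len : Int) then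
      some (PySem.List.pyRange start (start + required) 1)
    else pvScanB required rest (start + (len : Int))

def allocate_machines_first_fit_alt (job : List (String × Int)) (machine_statuses : List String) : Option (List Int) :=
  match (PySem.Dict.mk job).get? "resource_num" with
  | none => none  -- Python raises KeyError here; excluded by Pre_
  | some required =>
    if required ≤ 0 then none
    else pvScanB required (pvRuns machine_statuses) 0

-- ===== PRECONDITION & SPEC =====
-- Pre_ excludes exactly the inputs where job lacks the key "resource_num": there Python A raises KeyError.
def Pre_allocate_machines_first_fit (job : List (String × Int)) (machine_statuses : List String) : Prop :=
  "resource_num" ∈ job.map Prod.fst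
instance (job : List (String × Int)) (machine_statuses : List String) : Decidable (Pre_allocate_machines_first_fit job machine_statuses) := by unfold Pre_allocate_machines_first_fit; infer_instance

def pvWitness_allocate_machines_first_fit : (List (String × Int)) × List String :=
  ([("resource_num", 2)], ["busy", "idle", "idle", "idle"])

def Spec_allocate_machines_first_fit (job : List (String × Int)) (machine_statuses : List String) (out : Option (List Int)) : Prop := out = allocate_machines_first_fit_alt job machine_statuses
instance (job : List (String × Int)) (machine_statuses : List String) (out : Option (List Int)) : Decidable (Spec_allocate_machines_first_fit job machine_statuses out) := by unfold Spec_allocate_machines_first_fit; infer_instance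

-- ===== CLAIM (what is proved, stated in full; the proofs are below) =====
def Claim_equal_allocate_machines_first_fit : Prop := ∀ (job : List (String × Int)) (machine_statuses : List String), Dom_allocate_machines_first_fit job machine_statuses → Pre_allocate_machines_first_fit job machine_statuses → Spec_allocate_machines_first_fit job machine_statuses (allocate_machines_first_fit job machine_statuses)

-- ===== LEMMAS AND PROOFS =====

lemma pvRuns_nil : pvRuns [] = [] := by rw [pvRuns]

lemma pvRuns_cons (s : String) (rest : List String) :
    pvRuns (s :: rest) =
      (s, 1 + (rest.takeWhile (· = s)).length) :: pvRuns (rest.dropWhile (· = s)) := by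
  rw [pvRuns]

-- required ≤ 0: A's counter is ≥ 1 whenever tested, so A never returns a block.
lemma pvLoopA_nonpos (required : Int) (hreq : required ≤ 0) :
    ∀ xs i c s, 0 ≤ c → pvLoopA required xs i c s = none := by
  intro xs
  induction xs with
  | nil => intro i c s _; rfl
  | cons x rest ih =>
    intro i c s hc
    by_cases h1 : x = "idle"
    · have h2 : ¬ (c + 1 = required) := by omega
      simp only [pvLoopA, if_pos h1, if_neg h2]
      exact ih _ _ _ (by omega)
    · simp only [pvLoopA, if_neg h1]
      exact ih _ _ _ (by omega)

-- a run of idles, counter already ≥ 1 and below required, start fixed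
lemma pvLoopA_idle_run (required : Int) :
    ∀ (run : List String), (∀ x ∈ run, x = "idle") →
    ∀ (other : List String) (i c s : Int), 1 ≤ c → c < required →
      pvLoopA required (run ++ other) i c s =
        if required ≤ c + (run.length : Int) then
          some (PySem.List.pyRange s (s + required) 1)
        else pvLoopA required other (i + (run.length : Int)) (c + (run.length : Int)) s := by
  intro run
  induction run with
  | nil =>
    intro _ other i c s hc hlt
    simp only [List.nil_append, List.length_nil]
    rw [if_neg (show ¬ required ≤ c + ((0 : Nat) : Int) by push_cast; omega)]
    norm_num
  | cons x rest ih =>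
    intro hall other i c s hc hlt
    have hx : x = "idle" := hall x (by simp)
    have hc0 : ¬ c = 0 := by omega
    by_cases hdone : c + 1 = required
    · have hlhs : pvLoopA required ((x :: rest) ++ other) i c s =
          some (PySem.List.pyRange s (s + required) 1) := by
        simp [pvLoopA, hx, hc0, hdone]
      rw [hlhs,
        if_pos (show required ≤ c + (((x :: rest).length : Nat) : Int) by
          simp only [List.length_cons]; push_cast; omega)]
    · have hlhs : pvLoopA required ((x :: rest) ++ other) i c s =
          pvLoopA required (rest ++ other) (i + 1) (c + 1) s := by
        simp [pvLoopA, hx, hc0, hdone]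
      rw [hlhs,
        ih (fun y hy => hall y (by simp [hy])) other (i + 1) (c + 1) s (by omega) (by omega)]
      simp only [List.length_cons]
      by_cases hfit : required ≤ c + 1 + (rest.length : Int)
      · rw [if_pos hfit, if_pos (by push_cast; omega)]
      · rw [if_neg hfit, if_neg (by push_cast; omega)]
        have h1 : i + 1 + (rest.length : Int) = i + ((rest.length + 1 : Nat) : Int) := by
          push_cast; ring
        have h2 : c + 1 + (rest.length : Int) = c + ((rest.length + 1 : Nat) : Int) := by
          push_cast; ring
        rw [h1, h2]

-- a run of identical non-idle elements only resets the counter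
lemma pvLoopA_skip_run (required : Int) (a : String) (ha : a ≠ "idle") :
    ∀ (run : List String), (∀ x ∈ run, x = a) →
    ∀ (other : List String) (j s : Int),
      pvLoopA required (run ++ other) j 0 s = pvLoopA required other (j + (run.length : Int)) 0 s := by
  intro run
  induction run with
  | nil => intro _ other j s; norm_num
  | cons x r ihr =>
    intro hall other j s
    have hx : x ≠ "idle" := by rw [hall x (by simp)]; exact ha
    simp only [List.cons_append, pvLoopA, if_neg hx]
    rw [ihr (fun y hy => hall y (by simp [hy])) other (j + 1) s]
    have h1 : j + 1 + (r.length : Int) = j + (((x :: r).length : Nat) : Int) := by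
      simp only [List.length_cons]; push_cast; ring
    rw [h1]

-- the head of dropWhile fails the predicate
lemma pvDropWhile_head (p : String → Bool) :
    ∀ (l : List String), ∀ b t, l.dropWhile p = b :: t → p b = false := by
  intro l
  induction l with
  | nil => intro b t h; simp [List.dropWhile] at h
  | cons x rest ih =>
    intro b t h
    rw [List.dropWhile_cons] at h
    split_ifs at h with hx
    · exact ih b t h
    · cases h; simpa using hx

-- MAIN: A's scan with counter 0 equals B's scan over the runs, started at index i
lemma pvMain (required : Int) (hreq : 1 ≤ required) :
    ∀ (xs : List String) (i s : Int),
      pvLoopA required xs i 0 s = pvScanB required (pvRuns xs) i := by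
  intro xs
  induction hL : xs.length using Nat.strong_induction_on generalizing xs with
  | _ n ih =>
  intro i s
  cases xs with
  | nil => rw [pvRuns_nil]; rfl
  | cons a rest =>
    rw [pvRuns_cons, pvScanB]
    set tw := rest.takeWhile (· = a) with htw
    set dw := rest.dropWhile (· = a) with hdw
    have hsplit : tw ++ dw = rest := List.takeWhile_append_dropWhile
    have htake : ∀ x ∈ tw, x = a := by
      rw [htw]; intro x hx
      simpa using List.mem_takeWhile_imp hx
    have hlen_drop : dw.length < n := by
      have h := List.length_dropWhile_le (fun x => decide (x = a)) rest
      rw [← hdw] at h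
      simp only [List.length_cons] at hL
      omega
    clear_value tw dw
    by_cases ha : a = "idle"
    · -- idle run
      subst ha
      by_cases h1 : required = 1
      · rw [if_pos (show "idle" = "idle" ∧ required ≤ ((1 + tw.length : Nat) : Int) by
          exact ⟨rfl, by push_cast; omega⟩)]
        subst h1
        simp [pvLoopA]
      · have step : pvLoopA required ("idle" :: rest) i 0 s =
            pvLoopA required (tw ++ dw) (i + 1) 1 i := by
          rw [hsplit]
          simp [pvLoopA]
          exact fun h => absurd h.symm h1
        rw [step, pvLoopA_idle_run required tw htake dw (i + 1) 1 i le_rfl (by omega)]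
        by_cases hfit : required ≤ 1 + (tw.length : Int)
        · rw [if_pos (show required ≤ (1 : Int) + (tw.length : Int) from hfit),
            if_pos (show "idle" = "idle" ∧ required ≤ ((1 + tw.length : Nat) : Int) by
              exact ⟨rfl, by push_cast; omega⟩)]
        · rw [if_neg (show ¬ required ≤ (1 : Int) + (tw.length : Int) from hfit),
            if_neg (show ¬ ("idle" = "idle" ∧ required ≤ ((1 + tw.length : Nat) : Int)) by
              rintro ⟨-, h⟩; push_cast at h; omega)]
          cases hdrop : dw with
          | nil => rw [pvRuns_nil]; rfl
          | cons b t =>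
            have hb : b ≠ "idle" := by
              have hd : rest.dropWhile (fun x => decide (x = "idle")) = b :: t := by
                rw [← hdw]; exact hdrop
              have := pvDropWhile_head _ rest b t hd
              simpa using this
            have hforget : pvLoopA required (b :: t) (i + 1 + (tw.length : Int)) (1 + (tw.length : Int)) i =
                pvLoopA required (b :: t) (i + 1 + (tw.length : Int)) 0 i := by
              simp only [pvLoopA, if_neg hb]
            rw [hforget,
              ih (b :: t).length (by rw [← hdrop]; exact hlen_drop) (b :: t) rfl
                (i + 1 + (tw.length : Int)) i]
            have harg : i + 1 + (tw.length : Int) = i + ((1 + tw.length : Nat) : Int) := by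
              push_cast; ring
            rw [harg]
    · -- non-idle run: every element of the run resets the counter
      rw [if_neg (show ¬ (a = "idle" ∧ required ≤ ((1 + tw.length : Nat) : Int)) by
        rintro ⟨h, -⟩; exact ha h)]
      have step : pvLoopA required (a :: rest) i 0 s = pvLoopA required (tw ++ dw) (i + 1) 0 s := by
        rw [hsplit]
        simp [pvLoopA, ha]
      rw [step, pvLoopA_skip_run required a ha tw htake dw (i + 1) s,
        ih dw.length hlen_drop dw rfl (i + 1 + (tw.length : Int)) s]
      have harg : i + 1 + (tw.length : Int) = i + ((1 + tw.length : Nat) : Int) := by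
        push_cast; ring
      rw [harg]

-- ===== VERDICT (by name: the statement is the Claim_ definition above) =====
theorem allocate_machines_first_fit_spec : Claim_equal_allocate_machines_first_fit := by
  intro job ms _ _
  unfold Spec_allocate_machines_first_fit allocate_machines_first_fit allocate_machines_first_fit_alt
  cases h : (PySem.Dict.mk job).get? "resource_num" with
  | none => rfl
  | some required =>
    dsimp only
    by_cases hreq : required ≤ 0
    · rw [if_pos hreq, pvLoopA_nonpos required hreq ms 0 0 (-1) le_rfl]
    · rw [if_neg hreq, pvMain required (by omega)]
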